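-- pv_equiv track=rewrite | github.com/benstaiger/daily-coding-problem | problem_499/solution.py | check_rotation
-- ===== SOURCE A (Python) =====
-- def check_rotation(board):
--     n_rows = len(board)
--     n_cols = len(board[0])
--     assert n_rows == n_cols
--
--     def rotate_index(x, y):
--         return n_rows - x - 1, n_cols - y - 1
--
--     rotation = True
--     for i, row in enumerate(board):
--         for j, _ in enumerate(row):
--             ni, nj = rotate_index(i, j)
--             if board[ni][nj] != board[i][j]:
--                 rotation = False
--     return rotation
-- ===== SOURCE B (Python) =====
-- def check_rotation(board):
--     n_rows = len(board)
--     n_cols = len(board[0])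
--     assert n_rows == n_cols
--     rows = list(board)
--     ok = True
--     while len(rows) > 1:
--         top = rows.pop(0)
--         bottom = rows.pop()
--         if top != bottom[::-1]:
--             ok = False
--     if rows and rows[0] != rows[0][::-1]:
--         ok = False
--     return ok
-- ===== Notes on version B (the rewrite author's own statement) =====
-- stated objective: faster
-- what changed: Replaces A's nested per-cell 2D index loop with rotate_index arithmetic by a two-pointer loop over whole rows: repeatedly pop the top and bottom rows and compare the top row with the reversed bottom row, then palindrome-check the remaining middle row; per-cell Python-level indexing is replaced by row-level list operations.
-- outside the precondition, e.g. on check_rotation([[1, 2], [2, 1, 2]]): A returns True, B returns False; on check_rotation([]): A raises IndexError, B raises IndexError; on check_rotation([[1, 2]]): A raises AssertionError, B raises AssertionError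
import Mathlib
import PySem

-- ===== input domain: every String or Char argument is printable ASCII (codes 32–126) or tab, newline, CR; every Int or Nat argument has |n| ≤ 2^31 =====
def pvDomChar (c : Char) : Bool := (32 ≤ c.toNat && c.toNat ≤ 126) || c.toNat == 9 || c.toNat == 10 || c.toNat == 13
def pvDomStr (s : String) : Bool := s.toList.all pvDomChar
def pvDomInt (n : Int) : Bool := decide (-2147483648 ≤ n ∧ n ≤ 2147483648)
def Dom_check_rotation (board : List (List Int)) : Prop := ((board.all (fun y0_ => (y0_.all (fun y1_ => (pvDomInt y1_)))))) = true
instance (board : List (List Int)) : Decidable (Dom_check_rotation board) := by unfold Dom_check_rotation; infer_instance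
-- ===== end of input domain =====

-- B replaces A's nested 2D index loop by a two-pointer loop over whole ROWS: repeatedly pop the
-- top and bottom rows and compare the top row with the reversed bottom row, then palindrome-check
-- the middle row if one remains (objective: alternative decomposition, no index arithmetic).

-- ===== PORT A =====
def check_rotation (board : List (List Int)) : Bool :=
  let n_rows : Int := board.length
  let n_cols : Int := ((PySem.List.pyGet? board 0).getD []).length
  (PySem.List.enumerate board 0).foldl (fun rotation p =>
    (PySem.List.enumerate p.2 0).foldl (fun rotation q =>
      let ni := n_rows - p.1 - 1
      let nj := n_cols - q.1 - 1
      if (PySem.List.pyGet? board ni).bind (fun r => PySem.List.pyGet? r nj) ≠ some q.2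
      then false else rotation) rotation) true

-- ===== PORT B =====
-- the while-loop: pop the first and last row while more than one row remains,
-- clearing ok when the top row differs from the reversed bottom row
def pvPairLoop : List (List Int) → Bool → (List (List Int)) × Bool
  | r :: s :: t, ok =>
      let rest := s :: t
      let top := r
      let bottom := rest.getLast (by simp)
      pvPairLoop rest.dropLast (if top ≠ bottom.reverse then false else ok)
  | rows, ok => (rows, ok)
termination_by rows _ => rows.length
decreasing_by simp [List.length_dropLast]

def check_rotation_alt (board : List (List Int)) : Bool :=
  let p := pvPairLoop board true
  match p.1 with
  | m :: _ => if m ≠ m.reverse then false else p.2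
  | [] => p.2

-- ===== PRECONDITION & SPEC =====
-- Pre_ restricts to the natural domain: nonempty rectangular square boards.  A raises IndexError on [],
-- AssertionError on boards whose row 0 length differs from the row count, and on ragged boards passing
-- that assert A either raises IndexError or its value rests on Python's negative-index wraparound.
def Pre_check_rotation (board : List (List Int)) : Prop :=
  board ≠ [] ∧ ∀ row ∈ board, row.length = board.length
instance (board : List (List Int)) : Decidable (Pre_check_rotation board) := by
  unfold Pre_check_rotation; infer_instance

def pvWitness_check_rotation : List (List Int) := [[1, 2], [2, 1]]

def Spec_check_rotation (board : List (List Int)) (out : Bool) : Prop := out = check_rotation_alt board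
instance (board : List (List Int)) (out : Bool) : Decidable (Spec_check_rotation board out) := by unfold Spec_check_rotation; infer_instance

-- ===== CLAIM (what is proved, stated in full; the proofs are below) =====
def Claim_equal_check_rotation : Prop := ∀ (board : List (List Int)), Dom_check_rotation board → Pre_check_rotation board → Spec_check_rotation board (check_rotation board)

-- ===== LEMMAS AND PROOFS =====

-- the (i,j) entry of the board, total form
def pvCell (board : List (List Int)) (i j : Nat) : Int := (board.getD i []).getD j 0

theorem pv_foldl_if_false {α : Type} (p : α → Prop) [DecidablePred p] (l : List α) (b : Bool) :
    l.foldl (fun ok x => if p x then false else ok) b = (b && l.all (fun x => !decide (p x))) := by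
  induction l generalizing b with
  | nil => simp
  | cons a t ih =>
      simp only [List.foldl_cons, List.all_cons, ih]
      by_cases h : p a <;> simp [h]

theorem pv_foldl_and {α : Type} (f : α → Bool) (l : List α) (b : Bool) :
    l.foldl (fun ok x => ok && f x) b = (b && l.all f) := by
  induction l generalizing b with
  | nil => simp
  | cons a t ih => simp [ih, Bool.and_assoc]

-- characterization of A on square boards
theorem pvA_char (board : List (List Int)) (n : Nat)
    (hn : board.length = n) (hne : board ≠ [])
    (hsq : ∀ row ∈ board, row.length = n) :
    check_rotation board = true ↔
      ∀ i j, i < n → j < n → pvCell board (n - 1 - i) (n - 1 - j) = pvCell board i j := by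
  have hcols : ((PySem.List.pyGet? board 0).getD []).length = n := by
    cases board with
    | nil => exact absurd rfl hne
    | cons r t => simpa using hsq r (List.mem_cons_self ..)
  unfold check_rotation
  simp only [pv_foldl_if_false, pv_foldl_and, Bool.true_and, List.all_eq_true,
    Bool.not_eq_true', decide_eq_false_iff_not, not_not, PySem.List.mem_enumerate_iff, hcols, hn]
  constructor
  · intro h i j hi hj
    have hi' : i < board.length := by omega
    have hrow : board[i].length = n := hsq _ (List.getElem_mem hi')
    have hj' : j < board[i].length := by omega
    have := h ((i : Int), board[i]'hi') ⟨i, by omega, by simp⟩ ((j : Int), (board[i]'hi')[j]'hj') ⟨j, hj', by simp⟩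
    simp only at this
    rw [show (n : Int) - (i : Int) - 1 = ((n - 1 - i : Nat) : Int) by omega,
        show (n : Int) - (j : Int) - 1 = ((n - 1 - j : Nat) : Int) by omega,
        PySem.List.pyGet?_natCast] at this
    have hni : n - 1 - i < board.length := by omega
    rw [List.getElem?_eq_getElem hni] at this
    simp only [Option.bind_some, PySem.List.pyGet?_natCast] at this
    have hrow2 : board[n - 1 - i].length = n := hsq _ (List.getElem_mem hni)
    rw [List.getElem?_eq_getElem (by omega : n - 1 - j < board[n - 1 - i].length)] at this
    have := Option.some.inj this
    simpa [pvCell, List.getD_eq_getElem?_getD, List.getElem?_eq_getElem hni,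
      List.getElem?_eq_getElem (by omega : n - 1 - j < board[n-1-i].length),
      List.getElem?_eq_getElem hi', List.getElem?_eq_getElem hj'] using this
  · intro h p hp q hq
    obtain ⟨i, hi, rfl⟩ := hp
    have hi' : i < board.length := by omega
    have hrow : board[i].length = n := hsq _ (List.getElem_mem hi')
    obtain ⟨j, hj', rfl⟩ := hq
    simp only [zero_add] at hj' ⊢
    have hj : j < n := by omega
    rw [show (n : Int) - (i : Int) - 1 = ((n - 1 - i : Nat) : Int) by omega,
        show (n : Int) - (j : Int) - 1 = ((n - 1 - j : Nat) : Int) by omega,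
        PySem.List.pyGet?_natCast]
    have hni : n - 1 - i < board.length := by omega
    rw [List.getElem?_eq_getElem hni]
    simp only [Option.bind_some, PySem.List.pyGet?_natCast]
    have hrow2 : board[n - 1 - i].length = n := hsq _ (List.getElem_mem hni)
    rw [List.getElem?_eq_getElem (by omega : n - 1 - j < board[n - 1 - i].length)]
    have := h i j hi hj
    simp only [pvCell, List.getD_eq_getElem?_getD, List.getElem?_eq_getElem hni,
      List.getElem?_eq_getElem (by omega : n - 1 - j < board[n-1-i].length),
      List.getElem?_eq_getElem hi', List.getElem?_eq_getElem hj', Option.getD_some] at this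
    rw [this]

-- the combined "loop then middle check" computation that check_rotation_alt performs
def pvRun (rows : List (List Int)) (ok : Bool) : Bool :=
  let p := pvPairLoop rows ok
  match p.1 with
  | m :: _ => if m ≠ m.reverse then false else p.2
  | [] => p.2

theorem pvRun_eq : ∀ (fuel : Nat) (rows : List (List Int)) (ok : Bool), rows.length ≤ fuel →
    pvRun rows ok = (ok && decide (rows = rows.reverse.map List.reverse)) := by
  intro fuel
  induction fuel with
  | zero =>
      intro rows ok h
      have : rows = [] := List.eq_nil_of_length_eq_zero (by omega)
      subst this; simp [pvRun, pvPairLoop]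
  | succ f ih =>
      intro rows ok h
      match rows with
      | [] => simp [pvRun, pvPairLoop]
      | [m] =>
          have hp : pvPairLoop [m] ok = ([m], ok) := by
            rw [pvPairLoop]
            simp
          simp only [pvRun, hp]
          have hr : ([m] : List (List Int)).reverse.map List.reverse = [m.reverse] := by simp
          rw [hr]
          by_cases hm : m = m.reverse
          · rw [if_neg (not_not.mpr hm), decide_eq_true (show [m] = [m.reverse] by rw [← hm])]
            simp
          · rw [if_pos hm, decide_eq_false (show ¬([m] = [m.reverse]) by simp [hm])]
            simp
      | r :: s :: t =>
          have hrest : (s :: t) ≠ [] := by simp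
          set bottom := (s :: t).getLast hrest with hb
          set mid := (s :: t).dropLast with hmid
          have hdec : mid ++ [bottom] = s :: t := List.dropLast_append_getLast hrest
          have hlen : mid.length ≤ f := by
            have h1 : (mid ++ [bottom]).length = (s :: t).length := congrArg List.length hdec
            simp only [List.length_append, List.length_cons, List.length_nil] at h1
            simp only [List.length_cons] at h
            omega
          have hloop : pvPairLoop (r :: s :: t) ok
              = pvPairLoop mid (if r ≠ bottom.reverse then false else ok) := by
            rw [pvPairLoop]
          have hrun : pvRun (r :: s :: t) ok
              = pvRun mid (if r ≠ bottom.reverse then false else ok) := by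
            simp only [pvRun, hloop]
          rw [hrun, ih mid _ hlen]
          have hshape : (r :: s :: t) = r :: (mid ++ [bottom]) := by rw [hdec]
          rw [hshape]
          have hrevmap : (r :: (mid ++ [bottom])).reverse.map List.reverse
              = bottom.reverse :: (mid.reverse.map List.reverse ++ [r.reverse]) := by
            simp
          rw [hrevmap]
          by_cases hr : r = bottom.reverse
          · simp only [hr, ne_eq, not_true_eq_false]
            simp
          · simp [hr]

theorem pvB_char (board : List (List Int)) :
    check_rotation_alt board = true ↔ board = board.reverse.map List.reverse := by
  have : check_rotation_alt board = pvRun board true := rfl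
  rw [this, pvRun_eq board.length board true le_rfl]
  simp

-- rotation-as-list-equality ↔ A's pointwise condition, on square boards
theorem pv_rot_iff (board : List (List Int)) (n : Nat)
    (hn : board.length = n) (_hn0 : 0 < n)
    (hsq : ∀ row ∈ board, row.length = n) :
    (board = board.reverse.map List.reverse) ↔
      ∀ i j, i < n → j < n → pvCell board (n - 1 - i) (n - 1 - j) = pvCell board i j := by
  constructor
  · intro hEq i j hi hj
    have hi' : i < board.length := by omega
    have hni : n - 1 - i < board.length := by omega
    have hrow : board[i].length = n := hsq _ (List.getElem_mem hi')
    have hrow2 : board[n - 1 - i].length = n := hsq _ (List.getElem_mem hni)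
    have hidx : board.length - 1 - i = n - 1 - i := by omega
    have hrowEq : board[i]? = some ((board[n - 1 - i]'hni).reverse) := by
      conv_lhs => rw [hEq]
      rw [List.getElem?_eq_getElem (show i < (board.reverse.map List.reverse).length by
        simp; omega)]
      simp only [List.getElem_map, List.getElem_reverse, hidx]
    simp only [pvCell, List.getD_eq_getElem?_getD, hrowEq,
      List.getElem?_eq_getElem hni, Option.getD_some,
      List.getElem?_eq_getElem (show n - 1 - j < board[n - 1 - i].length by omega),
      List.getElem?_eq_getElem (show j < (board[n - 1 - i]'hni).reverse.length by
        simp only [List.length_reverse]; omega),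
      List.getElem_reverse, hrow2]
  · intro h
    apply List.ext_getElem (by simp)
    intro i hi hi2
    have hiN : i < n := by omega
    have hni : n - 1 - i < board.length := by omega
    have hrow : board[i].length = n := hsq _ (List.getElem_mem (by omega))
    have hrow2 : board[n - 1 - i].length = n := hsq _ (List.getElem_mem hni)
    rw [List.getElem_map, List.getElem_reverse]
    have hidx : board.length - 1 - i = n - 1 - i := by omega
    apply List.ext_getElem (by simp [hidx, hrow, hrow2])
    intro j hj hj2
    have hjN : j < n := by omega
    rw [List.getElem_reverse]
    have := h (n - 1 - i) (n - 1 - j) (by omega) (by omega)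
    rw [show n - 1 - (n - 1 - i) = i by omega, show n - 1 - (n - 1 - j) = j by omega] at this
    simp only [pvCell, List.getD_eq_getElem?_getD,
      List.getElem?_eq_getElem hni,
      List.getElem?_eq_getElem (show i < board.length by omega),
      Option.getD_some,
      List.getElem?_eq_getElem (show j < board[i].length by omega),
      List.getElem?_eq_getElem (show n - 1 - j < board[n - 1 - i].length by omega)] at this
    simp only [hidx, hrow2]
    exact this

-- ===== VERDICT (by name: the statement is the Claim_ definition above) =====
theorem check_rotation_spec : Claim_equal_check_rotation := by
  unfold Claim_equal_check_rotation Spec_check_rotation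
  intro board _ hpre
  obtain ⟨hne, hsq⟩ := hpre
  have hn0 : 0 < board.length := by
    cases board with
    | nil => exact absurd rfl hne
    | cons r t => simp
  rw [Bool.eq_iff_iff, pvA_char board board.length rfl hne hsq, pvB_char board,
      pv_rot_iff board board.length rfl hn0 hsq]
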